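-- pv_equiv track=rewrite | github.com/jessicadpo/capstone | tagme/helper_functions.py | filter_keyword_search_results
-- ===== SOURCE A (Python) =====
-- def filter_keyword_search_results(unfiltered_results, exclude_terms):
--     """Function for filtering out any KEYWORD search results that include excluded terms"""
--     # Filter all results without the right terms
--     filtered_results = []
--     for item in unfiltered_results:
--         found = False
--         if not isinstance(item, dict):
--             continue
--
--         for value in item.values():
--             if isinstance(value, str):
--                 if any(term.lower() in value.lower() for term in exclude_terms):
--                     found = True
--                     break
--         if not found:
--             filtered_results.append(item)
--     return filtered_results
-- ===== SOURCE B (Python) =====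
-- def filter_keyword_search_results(unfiltered_results, exclude_terms):
--     """Filter out keyword search results containing excluded terms.
--
--     Lowercases the exclude terms once, and for each result dict builds a single
--     NUL-joined lowercase haystack of its string values, so each term is searched
--     once per item instead of once per value."""
--     terms = [term.lower() for term in exclude_terms]
--     filtered_results = []
--     for item in unfiltered_results:
--         if not isinstance(item, dict):
--             continue
--         values = [v.lower() for v in item.values() if isinstance(v, str)]
--         haystack = "\x00".join(values)
--         if not values or not any(t in haystack for t in terms):
--             filtered_results.append(item)
--     return filtered_results
-- ===== Notes on version B (the rewrite author's own statement) =====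
-- stated objective: alternative
-- what changed: A scans every value with a per-term inner loop and a found-flag with break; B lowercases the exclude terms once and concatenates each dict's lowercased values into a single NUL-separated haystack, searching each term once per item instead of once per value.
import Mathlib
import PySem

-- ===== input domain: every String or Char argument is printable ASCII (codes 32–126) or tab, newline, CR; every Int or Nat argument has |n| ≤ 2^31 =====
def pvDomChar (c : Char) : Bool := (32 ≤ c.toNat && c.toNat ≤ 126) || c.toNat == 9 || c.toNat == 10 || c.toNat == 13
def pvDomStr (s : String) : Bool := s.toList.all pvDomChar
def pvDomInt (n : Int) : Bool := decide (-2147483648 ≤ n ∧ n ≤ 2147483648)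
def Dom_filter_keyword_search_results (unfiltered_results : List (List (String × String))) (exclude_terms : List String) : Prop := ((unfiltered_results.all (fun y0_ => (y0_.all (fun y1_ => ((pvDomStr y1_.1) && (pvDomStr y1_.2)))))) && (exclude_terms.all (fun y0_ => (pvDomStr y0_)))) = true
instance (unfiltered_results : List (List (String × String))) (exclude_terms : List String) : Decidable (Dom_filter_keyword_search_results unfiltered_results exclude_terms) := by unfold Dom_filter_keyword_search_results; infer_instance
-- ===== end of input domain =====

-- B lowercases the exclude terms once and searches each term once in a single
-- NUL-joined lowercase haystack per result dict, instead of A's per-value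
-- per-term inner loops with a found-flag (alternative decomposition).

-- ===== PORT A =====
-- A's inner 'for value in item.values(): … break' loop with its found-flag;
-- on this type every item is a dict of strings, so both isinstance tests are True.
def pvFoundLoop (exclude_terms : List String) : List String → Bool
  | [] => false
  | value :: rest =>
      if exclude_terms.any (fun term => PySem.Str.isIn (PySem.Str.lower term) (PySem.Str.lower value)) then
        true
      else
        pvFoundLoop exclude_terms rest

def filter_keyword_search_results (unfiltered_results : List (List (String × String))) (exclude_terms : List String) : List (List (String × String)) :=
  unfiltered_results.foldl
    (fun filtered_results item =>
      if !(pvFoundLoop exclude_terms (item.map Prod.snd)) then filtered_results ++ [item]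
      else filtered_results)
    []

-- ===== PORT B =====
def filter_keyword_search_results_alt (unfiltered_results : List (List (String × String))) (exclude_terms : List String) : List (List (String × String)) :=
  let terms := exclude_terms.map PySem.Str.lower
  unfiltered_results.foldl
    (fun filtered_results item =>
      let values := (item.map Prod.snd).map PySem.Str.lower
      let haystack := PySem.Str.join "\x00" values
      if values.isEmpty || !(terms.any (fun t => PySem.Str.isIn t haystack)) then filtered_results ++ [item]
      else filtered_results)
    []

-- ===== PRECONDITION & SPEC =====
def Spec_filter_keyword_search_results (unfiltered_results : List (List (String × String))) (exclude_terms : List String) (out : List (List (String × String))) : Prop := out = filter_keyword_search_results_alt unfiltered_results exclude_terms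
instance (unfiltered_results : List (List (String × String))) (exclude_terms : List String) (out : List (List (String × String))) : Decidable (Spec_filter_keyword_search_results unfiltered_results exclude_terms out) := by unfold Spec_filter_keyword_search_results; infer_instance

-- ===== CLAIM (what is proved, stated in full; the proofs are below) =====
def Claim_equal_filter_keyword_search_results : Prop := ∀ (unfiltered_results : List (List (String × String))) (exclude_terms : List String), Dom_filter_keyword_search_results unfiltered_results exclude_terms → Spec_filter_keyword_search_results unfiltered_results exclude_terms (filter_keyword_search_results unfiltered_results exclude_terms)


-- ===== LEMMAS AND PROOFS =====
theorem pv_prefix_split {t : List Char} {c : Char} (hc : c ∉ t) :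
    ∀ {x y : List Char}, t <+: x ++ c :: y → t <+: x := by
  induction t with
  | nil => intro x y _; exact List.nil_prefix
  | cons b t' ih =>
    intro x y h
    cases x with
    | nil =>
      rcases List.cons_prefix_cons.mp h with ⟨hb, _⟩
      exact absurd (hb ▸ List.mem_cons_self) hc
    | cons a x' =>
      rcases List.cons_prefix_cons.mp h with ⟨hb, ht⟩
      exact hb ▸ List.cons_prefix_cons.mpr ⟨rfl, ih (fun hm => hc (List.mem_cons_of_mem _ hm)) ht⟩

theorem pv_infix_split {t : List Char} {c : Char} (hc : c ∉ t) :
    ∀ {x y : List Char}, t <:+: x ++ c :: y ↔ t <:+: x ∨ t <:+: y := by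
  intro x y
  constructor
  · intro h
    induction x with
    | nil =>
      simp only [List.nil_append] at h
      rcases List.infix_cons_iff.mp h with hp | hi
      · cases t with
        | nil => exact Or.inl List.nil_infix
        | cons b t' =>
          rcases List.cons_prefix_cons.mp hp with ⟨hb, _⟩
          exact absurd (hb ▸ List.mem_cons_self) hc
      · exact Or.inr hi
    | cons a x' ihx =>
      rcases List.infix_cons_iff.mp h with hp | hi
      · exact Or.inl ((pv_prefix_split hc hp).isInfix)
      · rcases ihx hi with h1 | h2
        · exact Or.inl (h1.trans ⟨[a], [], by simp⟩)
        · exact Or.inr h2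
  · rintro (h | h)
    · exact h.trans ((List.prefix_append x (c :: y)).isInfix)
    · exact h.trans ⟨x ++ [c], [], by simp⟩

theorem pv_infix_join {t : List Char} {c : Char} (hc : c ∉ t) :
    ∀ (pieces : List (List Char)), pieces ≠ [] →
      (t <:+: PySem.Chars.join [c] pieces ↔ ∃ p ∈ pieces, t <:+: p) := by
  intro pieces
  induction pieces with
  | nil => intro h; exact absurd rfl h
  | cons p rest ih =>
    intro _
    cases rest with
    | nil => simp [PySem.Chars.join_singleton]
    | cons q rest' =>
      rw [PySem.Chars.join_cons_cons]
      have harr : p ++ [c] ++ PySem.Chars.join [c] (q :: rest') = p ++ c :: PySem.Chars.join [c] (q :: rest') := by simp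
      rw [harr, pv_infix_split hc, ih (by simp)]
      constructor
      · rintro (h | ⟨r, hr, h⟩)
        · exact ⟨p, by simp, h⟩
        · exact ⟨r, by simp [hr], h⟩
      · rintro ⟨r, hr, h⟩
        rcases List.mem_cons.mp hr with rfl | hr'
        · exact Or.inl h
        · exact Or.inr ⟨r, hr', h⟩

theorem pv_lowerChar_ne_nul {c : Char} (h : pvDomChar c = true) :
    PySem.Chars.lowerChar c ≠ '\x00' := by
  have hge : 9 ≤ c.toNat := by
    unfold pvDomChar at h
    simp only [Bool.or_eq_true, Bool.and_eq_true, decide_eq_true_eq, beq_iff_eq] at h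
    generalize hn : c.toNat = n at h ⊢
    rcases h with ⟨h1, _⟩ | h2 | h2 | h2 <;> omega
  unfold PySem.Chars.lowerChar
  split_ifs with hu
  · simp only [PySem.Chars.isupper, Bool.and_eq_true, decide_eq_true_eq] at hu
    have hle : c.toNat ≤ 90 := by
      have h2 := hu.2
      rw [Char.le_def, UInt32.le_iff_toNat_le] at h2
      exact h2
    intro heq
    have h1 : (Char.ofNat (c.toNat + 32)).toNat = 0 := by rw [heq]; rfl
    rw [Char.toNat_ofNat, if_pos (Or.inl (by omega : c.toNat + 32 < 0xD800))] at h1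
    omega
  · intro heq
    rw [heq] at hge
    simp at hge

-- No NUL in the lowercase of a Dom string.
theorem pv_nul_not_mem_lower {s : String} (h : pvDomStr s = true) :
    ('\x00' : Char) ∉ PySem.Chars.lower s.toList := by
  intro hm
  rcases List.mem_map.mp hm with ⟨c, hc, heq⟩
  have hdom : pvDomChar c = true := by
    unfold pvDomStr at h
    exact List.all_eq_true.mp h c hc
  exact pv_lowerChar_ne_nul hdom heq

-- A's found-flag loop is an 'any' over the values.
theorem pvFoundLoop_eq_any (ex : List String) (vs : List String) :
    pvFoundLoop ex vs
      = vs.any (fun v => ex.any (fun term => PySem.Str.isIn (PySem.Str.lower term) (PySem.Str.lower v))) := by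
  induction vs with
  | nil => rfl
  | cons v rest ih =>
    rw [pvFoundLoop, List.any_cons, ih]
    cases hc : ex.any (fun term => PySem.Str.isIn (PySem.Str.lower term) (PySem.Str.lower v)) <;> simp

-- Per item: A's keep-condition equals B's keep-condition (on Dom strings).
theorem pv_item_eq (ex : List String) (item : List (String × String))
    (hex : ex.all (fun t => pvDomStr t) = true) :
    (!(pvFoundLoop ex (item.map Prod.snd)))
      = (((item.map Prod.snd).map PySem.Str.lower).isEmpty
          || !((ex.map PySem.Str.lower).any (fun t =>
                PySem.Str.isIn t (PySem.Str.join "\x00" ((item.map Prod.snd).map PySem.Str.lower))))) := by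
  cases hitem0 : item with
  | nil => rfl
  | cons p0 rest0 =>
    rw [← hitem0]
    have hne : item.map Prod.snd ≠ [] := by rw [hitem0]; simp
    have hempty : ((item.map Prod.snd).map PySem.Str.lower).isEmpty = false := by
      rw [List.isEmpty_eq_false_iff]
      simpa using hne
    rw [hempty, Bool.false_or]
    congr 1
    rw [pvFoundLoop_eq_any]
    rw [Bool.eq_iff_iff]
    simp only [List.any_eq_true, List.mem_map]
    constructor
    · rintro ⟨v, ⟨pr, hpr, rfl⟩, term, hterm, hin⟩
      refine ⟨PySem.Str.lower term, ⟨term, hterm, rfl⟩, ?_⟩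
      rw [PySem.Str.isIn_iff_infix] at hin ⊢
      rw [PySem.Str.toList_join]
      have hnul : ('\x00' : Char) ∉ (PySem.Str.lower term).toList := by
        rw [PySem.Str.toList_lower]
        exact pv_nul_not_mem_lower (by
          rcases List.all_eq_true.mp hex term hterm with h
          exact h)
      have hsep : ("\x00" : String).toList = ['\x00'] := rfl
      rw [hsep]
      rw [pv_infix_join hnul _ (by simpa using hne)]
      exact ⟨(PySem.Str.lower pr.2).toList, List.mem_map.mpr ⟨PySem.Str.lower pr.2, List.mem_map.mpr ⟨pr.2, List.mem_map.mpr ⟨pr, hpr, rfl⟩, rfl⟩, rfl⟩, hin⟩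
    · rintro ⟨t, ⟨term, hterm, rfl⟩, hin⟩
      rw [PySem.Str.isIn_iff_infix, PySem.Str.toList_join] at hin
      have hnul : ('\x00' : Char) ∉ (PySem.Str.lower term).toList := by
        rw [PySem.Str.toList_lower]
        exact pv_nul_not_mem_lower (List.all_eq_true.mp hex term hterm)
      have hsep : ("\x00" : String).toList = ['\x00'] := rfl
      rw [hsep, pv_infix_join hnul _ (by simpa using hne)] at hin
      rcases hin with ⟨pl, hpl, hinf⟩
      rcases List.mem_map.mp hpl with ⟨lv, hlv, rfl⟩
      rcases List.mem_map.mp hlv with ⟨v, hv, rfl⟩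
      rcases List.mem_map.mp hv with ⟨pr, hpr, rfl⟩
      exact ⟨pr.2, ⟨pr, hpr, rfl⟩, term, hterm, (PySem.Str.isIn_iff_infix _ _).mpr hinf⟩

-- ===== VERDICT (by name: the statement is the Claim_ definition above) =====
theorem filter_keyword_search_results_spec : Claim_equal_filter_keyword_search_results := by
  intro ur ex hdom
  unfold Spec_filter_keyword_search_results
  unfold Dom_filter_keyword_search_results at hdom
  rw [Bool.and_eq_true] at hdom
  unfold filter_keyword_search_results filter_keyword_search_results_alt
  simp only [PySem.List.foldl_append_if, List.map_id', List.nil_append]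
  apply List.filter_congr
  intro item _
  exact pv_item_eq ex item hdom.2
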